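-- pv_equiv track=rewrite | github.com/moimfeld/cv32e40p | example_tb/scripts/predecoder_generator/functions/predecoder_generator_helper_functions.py | instr_mask
-- ===== SOURCE A (Python) =====
-- def instr_mask(instr_data):
--     instr_list = instr_data.split()
--     raw_data = (instr_list[2])[4:]
--     mask = '    instr_mask: 32\'b '
--     previous_letter = ''
--     for index in range(len(raw_data)):
--         if ((raw_data[index] == '0' or raw_data[index] == '1') and previous_letter != '?'):
--             mask += '1'
--         elif ((previous_letter == '0' or previous_letter == '1') and raw_data[index] == '?'):
--             mask += '_'
--             mask += '0'
--         elif ((previous_letter != '0' or previous_letter != '1') and raw_data[index] == '?'):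
--             mask += '0'
--         elif ((raw_data[index] == '0' or raw_data[index] == '1') and previous_letter == '?'):
--             mask += '_'
--             mask += '1'
--         previous_letter = raw_data[index]
--     mask += ','
--     return mask
-- ===== SOURCE B (Python) =====
-- def instr_mask(instr_data):
--     raw_data = instr_data.split()[2][4:]
--
--     def cls(ch):
--         return 0 if ch in '01' else 1 if ch == '?' else 2
--
--     # run-length encode raw_data by character class
--     runs = []
--     for ch in raw_data:
--         k = cls(ch)
--         if runs and runs[-1][0] == k:
--             runs[-1][1] += 1
--         else:
--             runs.append([k, 1])
--
--     # emit one chunk per run, with '_' between adjacent known/unknown runs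
--     parts = []
--     prev = 2
--     for k, n in runs:
--         if (prev, k) in ((0, 1), (1, 0)):
--             parts.append('_')
--         parts.append('1' * n if k == 0 else '0' * n if k == 1 else '')
--         prev = k
--     return "    instr_mask: 32'b " + ''.join(parts) + ','
-- ===== Notes on version B (the rewrite author's own statement) =====
-- stated objective: alternative
-- what changed: Replaces A's per-character four-branch if/elif state machine by a two-pass decomposition: run-length encode the characters by class (known/unknown/other), then emit one chunk per run with an underscore separator only between adjacent known/unknown runs.
import Mathlib
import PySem

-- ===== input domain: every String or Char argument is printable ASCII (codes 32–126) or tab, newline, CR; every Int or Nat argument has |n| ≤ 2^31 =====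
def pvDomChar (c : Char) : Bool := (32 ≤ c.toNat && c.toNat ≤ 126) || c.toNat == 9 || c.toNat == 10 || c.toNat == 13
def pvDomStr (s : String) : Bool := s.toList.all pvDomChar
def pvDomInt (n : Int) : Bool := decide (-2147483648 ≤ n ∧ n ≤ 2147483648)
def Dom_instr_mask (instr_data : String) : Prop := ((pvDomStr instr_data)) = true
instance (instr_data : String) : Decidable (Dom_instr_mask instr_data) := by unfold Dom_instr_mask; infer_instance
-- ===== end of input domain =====

-- B replaces A's per-character if/elif chain by a two-pass run-length decomposition
-- (group by character class, then emit one chunk per run); alternative structure, same O(n) cost.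

-- ===== PORT A =====
-- one loop iteration of A: the four-branch if/elif chain on (current char, previous_letter)
def pvStepA (st : List Char × Option Char) (c : Char) : List Char × Option Char :=
  if (c = '0' ∨ c = '1') ∧ st.2 ≠ some '?' then (st.1 ++ ['1'], some c)
  else if (st.2 = some '0' ∨ st.2 = some '1') ∧ c = '?' then (st.1 ++ ['_', '0'], some c)
  else if (st.2 ≠ some '0' ∨ st.2 ≠ some '1') ∧ c = '?' then (st.1 ++ ['0'], some c)
  else if (c = '0' ∨ c = '1') ∧ st.2 = some '?' then (st.1 ++ ['_', '1'], some c)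
  else (st.1, some c)

def instr_mask (instr_data : String) : String :=
  match PySem.List.pyGet? (PySem.Str.split₀ instr_data) 2 with
  | none => ""  -- IndexError in Python (fewer than 3 tokens); excluded by Pre_
  | some tok =>
    let raw_data := PySem.List.slice tok.toList (some 4) none
    let st := raw_data.foldl pvStepA ("    instr_mask: 32'b ".toList, none)
    String.ofList (st.1 ++ [','])

-- ===== PORT B =====
-- character class: 0 = known ('0'/'1'), 1 = unknown ('?'), 2 = other
def pvCls (c : Char) : Nat := if c = '0' ∨ c = '1' then 0 else if c = '?' then 1 else 2

-- run-length-encoding step; runs kept newest-first (Python updates runs[-1]), reversed after the loop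
def pvRle (acc : List (Nat × Nat)) (c : Char) : List (Nat × Nat) :=
  match acc with
  | (k', n) :: t => if k' = pvCls c then (k', n + 1) :: t else (pvCls c, 1) :: (k', n) :: t
  | [] => [(pvCls c, 1)]

def pvText (k n : Nat) : List Char :=
  if k = 0 then List.replicate n '1' else if k = 1 then List.replicate n '0' else []

def pvSep (p k : Nat) : List Char :=
  if (p = 0 ∧ k = 1) ∨ (p = 1 ∧ k = 0) then ['_'] else []

def pvStepB (st : List Char × Nat) (r : Nat × Nat) : List Char × Nat :=
  (st.1 ++ pvSep st.2 r.1 ++ pvText r.1 r.2, r.1)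

def instr_mask_alt (instr_data : String) : String :=
  match PySem.List.pyGet? (PySem.Str.split₀ instr_data) 2 with
  | none => ""  -- IndexError in Python; excluded by Pre_
  | some tok =>
    let raw_data := PySem.List.slice tok.toList (some 4) none
    let runs := (raw_data.foldl pvRle []).reverse
    let st := runs.foldl pvStepB ([], 2)
    String.ofList ("    instr_mask: 32'b ".toList ++ st.1 ++ [','])

-- ===== PRECONDITION & SPEC =====
-- Pre_ excludes exactly the inputs with fewer than 3 whitespace-separated tokens,
-- on which Python A raises IndexError at instr_list[2].
def Pre_instr_mask (instr_data : String) : Prop :=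
  3 ≤ (PySem.Str.split₀ instr_data).length
instance (instr_data : String) : Decidable (Pre_instr_mask instr_data) := by
  unfold Pre_instr_mask; infer_instance

def pvWitness_instr_mask : String := "c.mp4 0 inst01??01x?"

def Spec_instr_mask (instr_data : String) (out : String) : Prop := out = instr_mask_alt instr_data
instance (instr_data : String) (out : String) : Decidable (Spec_instr_mask instr_data out) := by unfold Spec_instr_mask; infer_instance

-- ===== CLAIM (what is proved, stated in full; the proofs are below) =====
def Claim_equal_instr_mask : Prop := ∀ (instr_data : String), Dom_instr_mask instr_data → Pre_instr_mask instr_data → Spec_instr_mask instr_data (instr_mask instr_data)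

-- ===== LEMMAS AND PROOFS =====

-- class of A's previous_letter ('' at the start behaves like class 2: not '0'/'1', not '?')
def pvClsOpt : Option Char → Nat
  | none => 2
  | some c => pvCls c

def pvOne (k : Nat) : List Char :=
  if k = 0 then ['1'] else if k = 1 then ['0'] else []

def pvEmit (p k : Nat) : List Char := pvSep p k ++ pvOne k

-- functional form of A's loop body output
def pvCharFold : Nat → List Char → List Char
  | _, [] => []
  | p, c :: cs => pvEmit p (pvCls c) ++ pvCharFold (pvCls c) cs

-- functional form of B's run loop output
def pvBodyF : Nat → List (Nat × Nat) → List Char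
  | _, [] => []
  | p, (k, n) :: t => pvSep p k ++ pvText k n ++ pvBodyF k t

-- cons-direction run-length encoding and its single-run merge
def pvMergeFront (k n : Nat) (rs : List (Nat × Nat)) : List (Nat × Nat) :=
  match rs with
  | (k', n') :: t => if k' = k then (k, n + n') :: t else (k, n) :: (k', n') :: t
  | [] => [(k, n)]

def pvRunsRec : List Char → List (Nat × Nat)
  | [] => []
  | c :: cs => pvMergeFront (pvCls c) 1 (pvRunsRec cs)

theorem pvStepA_emit (mask : List Char) (prev : Option Char) (c : Char) :
    pvStepA (mask, prev) c = (mask ++ pvEmit (pvClsOpt prev) (pvCls c), some c) := by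
  cases prev with
  | none =>
    simp only [pvStepA, pvEmit, pvSep, pvOne, pvCls, pvClsOpt]
    split_ifs <;> simp_all
  | some p =>
    simp only [pvStepA, pvEmit, pvSep, pvOne, pvCls, pvClsOpt, Option.some.injEq]
    split_ifs <;> simp_all

theorem pvFoldA (l : List Char) : ∀ (mask : List Char) (prev : Option Char),
    (l.foldl pvStepA (mask, prev)).1 = mask ++ pvCharFold (pvClsOpt prev) l := by
  induction l with
  | nil => intro mask prev; simp [pvCharFold]
  | cons c cs ih =>
    intro mask prev
    simp only [List.foldl_cons, pvStepA_emit]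
    rw [ih]
    simp [pvCharFold, pvClsOpt]

theorem pvFoldB (rs : List (Nat × Nat)) : ∀ (acc : List Char) (p : Nat),
    (rs.foldl pvStepB (acc, p)).1 = acc ++ pvBodyF p rs := by
  induction rs with
  | nil => intro acc p; simp [pvBodyF]
  | cons r t ih =>
    intro acc p
    obtain ⟨k, n⟩ := r
    simp only [List.foldl_cons, pvStepB]
    rw [ih]
    simp [pvBodyF]

theorem pvRle_shift (l : List Char) : ∀ (a : Nat × Nat) (t : List (Nat × Nat)),
    l.foldl pvRle (a :: t) = l.foldl pvRle [a] ++ t := by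
  induction l with
  | nil => intro a t; simp
  | cons c cs ih =>
    intro a t
    obtain ⟨k', n⟩ := a
    simp only [List.foldl_cons, pvRle]
    by_cases h : k' = pvCls c
    · rw [if_pos h, if_pos h, ih (k', n + 1) t]
    · rw [if_neg h, if_neg h, ih (pvCls c, 1) ((k', n) :: t), ih (pvCls c, 1) [(k', n)]]
      simp

theorem pvMergeFront_head (k n : Nat) (rs : List (Nat × Nat)) :
    ∃ m t, pvMergeFront k n rs = (k, m) :: t := by
  cases rs with
  | nil => exact ⟨n, [], rfl⟩
  | cons r t =>
    obtain ⟨k', n'⟩ := r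
    by_cases h : k' = k
    · exact ⟨n + n', t, by simp [pvMergeFront, h]⟩
    · exact ⟨n, (k', n') :: t, by simp [pvMergeFront, h]⟩

theorem pvMergeFront_merge (k n : Nat) (rs : List (Nat × Nat)) :
    pvMergeFront k n (pvMergeFront k 1 rs) = pvMergeFront k (n + 1) rs := by
  cases rs with
  | nil => simp [pvMergeFront]
  | cons r t =>
    obtain ⟨k', n'⟩ := r
    by_cases h : k' = k
    · simp [pvMergeFront, h, Nat.add_assoc]
    · simp [pvMergeFront, h]

theorem pvRuns_aux (cs : List Char) : ∀ (k n : Nat),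
    (cs.foldl pvRle [(k, n)]).reverse = pvMergeFront k n (pvRunsRec cs) := by
  induction cs with
  | nil => intro k n; simp [pvRunsRec, pvMergeFront]
  | cons c cs ih =>
    intro k n
    simp only [List.foldl_cons, pvRle]
    by_cases h : k = pvCls c
    · simp only [h, if_true, ih]
      rw [pvRunsRec, ← h, pvMergeFront_merge]
    · simp only [h, if_false]
      rw [pvRle_shift cs (pvCls c, 1) [(k, n)], List.reverse_append, ih]
      obtain ⟨m, t, hm⟩ := pvMergeFront_head (pvCls c) 1 (pvRunsRec cs)
      rw [pvRunsRec, hm]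
      have h' : pvCls c ≠ k := fun hh => h hh.symm
      simp [pvMergeFront, h']

theorem pvRuns_eq (l : List Char) : (l.foldl pvRle []).reverse = pvRunsRec l := by
  cases l with
  | nil => simp [pvRunsRec]
  | cons c cs => simp only [List.foldl_cons, pvRle, pvRuns_aux, pvRunsRec]

theorem pvSep_self (k : Nat) : pvSep k k = [] := by
  simp only [pvSep, ite_eq_right_iff]
  intro h; omega

theorem pvText_one (k : Nat) : pvText k 1 = pvOne k := by
  simp only [pvText, pvOne]; split_ifs <;> rfl

theorem pvText_succ (k n : Nat) : pvText k (1 + n) = pvOne k ++ pvText k n := by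
  simp only [pvText, pvOne]
  split_ifs <;> simp [List.replicate_succ, Nat.add_comm]

theorem pvMain (l : List Char) : ∀ (p : Nat),
    pvCharFold p l = pvBodyF p (pvRunsRec l) := by
  induction l with
  | nil => intro p; simp [pvCharFold, pvRunsRec, pvBodyF]
  | cons c cs ih =>
    intro p
    rw [pvCharFold, pvRunsRec, pvEmit, ih]
    cases hrs : pvRunsRec cs with
    | nil => simp [pvMergeFront, pvBodyF, pvText_one]
    | cons r t =>
      obtain ⟨k', n'⟩ := r
      by_cases h : k' = pvCls c
      · subst h
        simp only [pvMergeFront, if_true, pvBodyF, pvText_succ, pvSep_self]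
        simp
      · simp only [pvMergeFront, h, if_false, pvBodyF, pvText_one]
        try simp

-- ===== VERDICT (by name: the statement is the Claim_ definition above) =====
theorem instr_mask_spec : Claim_equal_instr_mask := by
  intro s _ _
  unfold Spec_instr_mask instr_mask instr_mask_alt
  cases h : PySem.List.pyGet? (PySem.Str.split₀ s) 2 with
  | none => rfl
  | some tok =>
    simp only []
    rw [pvFoldA, pvFoldB, pvRuns_eq, pvMain]
    simp [pvClsOpt]
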